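-- pv_equiv track=rewrite | github.com/bitwitch/advent-of-code | aoc2021/08-seven-segment-search/seven_segments.py | segs_absent_from_n_digits
-- ===== SOURCE A (Python) =====
-- def segs_absent_from_n_digits(patterns, n):
--     segs = set()
--     for seg in 'abcdefg':
--         count = 0
--         for pattern in patterns:
--             if seg in pattern:
--                 count += 1
--         if count == len(patterns)-n:
--             segs.add(seg)
--     return segs
-- ===== SOURCE B (Python) =====
-- def segs_absent_from_n_digits(patterns, n):
--     # Build one frequency table (patterns containing each char) in a single pass,
--     # then read off the 7 segments with constant-time lookups.
--     counts = {}
--     for p in patterns: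
--         for ch in set(p):
--             counts[ch] = counts.get(ch, 0) + 1
--     target = len(patterns) - n
--     return {seg for seg in 'abcdefg' if counts.get(seg, 0) == target}
-- ===== Notes on version B (the rewrite author's own statement) =====
-- stated objective: idiomatic
-- what changed: Replaces seven independent full scans of patterns (one per segment) with a single pass that builds a per-character frequency table, then a constant-time lookup per segment.
import Mathlib
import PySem

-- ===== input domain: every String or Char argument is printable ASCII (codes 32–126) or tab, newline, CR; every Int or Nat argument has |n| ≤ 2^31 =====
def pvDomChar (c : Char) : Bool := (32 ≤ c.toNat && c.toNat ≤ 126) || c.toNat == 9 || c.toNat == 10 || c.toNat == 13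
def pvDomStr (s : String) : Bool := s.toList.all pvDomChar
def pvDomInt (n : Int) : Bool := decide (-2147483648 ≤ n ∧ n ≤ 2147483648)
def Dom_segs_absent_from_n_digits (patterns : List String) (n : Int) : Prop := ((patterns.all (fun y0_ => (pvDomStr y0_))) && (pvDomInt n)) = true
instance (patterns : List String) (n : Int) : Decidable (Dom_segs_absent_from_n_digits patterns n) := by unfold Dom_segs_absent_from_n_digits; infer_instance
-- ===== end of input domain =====

-- B replaces A's seven independent scans of `patterns` with one frequency-table pass plus
-- constant-time lookups (idiomatic table-first decomposition; same asymptotic cost class).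

-- ===== PORT A =====
def segs_absent_from_n_digits (patterns : List String) (n : Int) : List String :=
  "abcdefg".toList.foldl (fun segs seg =>
    let count := patterns.foldl (fun c pattern =>
      if pattern.toList.contains seg then c + 1 else c) (0 : Int)
    if count == (patterns.length : Int) - n then PySem.Set.add segs (String.ofList [seg]) else segs)
    ([] : PySem.Set String)

-- ===== PORT B =====
def segs_absent_from_n_digits_alt (patterns : List String) (n : Int) : List String :=
  let counts : PySem.Dict Char Int := patterns.foldl (fun d p =>
    (PySem.Set.ofList p.toList).foldl (fun d ch => d.insert ch (d.getD ch 0 + 1)) d)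
    PySem.Dict.empty
  let target := (patterns.length : Int) - n
  "abcdefg".toList.foldl (fun s seg =>
    if counts.getD seg 0 == target then PySem.Set.add s (String.ofList [seg]) else s)
    ([] : PySem.Set String)

-- ===== PRECONDITION & SPEC =====
def Spec_segs_absent_from_n_digits (patterns : List String) (n : Int) (out : List String) : Prop := out = segs_absent_from_n_digits_alt patterns n
instance (patterns : List String) (n : Int) (out : List String) : Decidable (Spec_segs_absent_from_n_digits patterns n out) := by unfold Spec_segs_absent_from_n_digits; infer_instance

-- ===== CLAIM (what is proved, stated in full; the proofs are below) =====
def Claim_equal_segs_absent_from_n_digits : Prop := ∀ (patterns : List String) (n : Int), Dom_segs_absent_from_n_digits patterns n → Spec_segs_absent_from_n_digits patterns n (segs_absent_from_n_digits patterns n)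

-- ===== LEMMAS AND PROOFS =====

-- count of a char in the deduplicated char list of a pattern: 1 if present, else 0
lemma count_ofList_eq (l : List Char) (seg : Char) :
    ((PySem.Set.ofList l).count seg : Int) = (if l.contains seg then 1 else 0) := by
  by_cases h : seg ∈ l
  · rw [List.count_eq_one_of_mem (PySem.Set.nodup_ofList l) (by simpa [PySem.Set.mem_ofList] using h)]
    simp [h]
  · rw [List.count_eq_zero_of_not_mem (by simpa [PySem.Set.mem_ofList] using h)]
    simp [h]

-- B's frequency table holds, for each char, the number of patterns containing it
lemma counts_getD (patterns : List String) (seg : Char) :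
    ∀ d : PySem.Dict Char Int,
    (patterns.foldl (fun d p =>
      (PySem.Set.ofList p.toList).foldl (fun d ch => d.insert ch (d.getD ch 0 + 1)) d) d).getD seg 0
      = d.getD seg 0 + (patterns.countP (fun p => p.toList.contains seg) : Int) := by
  induction patterns with
  | nil => intro d; simp
  | cons p ps ih =>
    intro d
    rw [List.foldl_cons, ih, PySem.Dict.getD_foldl_insert_add_one, count_ofList_eq]
    rw [List.countP_cons]
    by_cases h : seg ∈ p.toList <;> simp [h]; ring

-- ===== VERDICT (by name: the statement is the Claim_ definition above) =====
theorem segs_absent_from_n_digits_spec : Claim_equal_segs_absent_from_n_digits := by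
  intro patterns n _
  unfold Spec_segs_absent_from_n_digits segs_absent_from_n_digits segs_absent_from_n_digits_alt
  apply PySem.List.foldl_congr_mem
  intro segs seg _
  rw [PySem.List.foldl_if_add_one, counts_getD, PySem.Dict.getD_empty]
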